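-- pv_equiv track=rewrite | github.com/NoStress1337/solved-tasks | SumsQuarters.py | sum_in_area
-- ===== SOURCE A (Python) =====
-- def sum_in_area(matrix : list) -> int:
--     sum_up, sum_left, sum_right, sum_down = 0, 0, 0, 0
--     for i in range(len(matrix)):
--         for j in range(len(matrix)):
--             if i > j:
--                 if i < len(matrix) - 1 - j:
--                     sum_left += matrix[i][j]
--                 elif i > len(matrix) - 1 - j:
--                     sum_down += matrix[i][j]
--             if i < j:
--                 if i < len(matrix) - 1 - j:
--                     sum_up += matrix[i][j]
--                 elif i > len(matrix) - 1 - j: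
--                     sum_right += matrix[i][j]
--     return sum_up, sum_right, sum_down, sum_left
-- ===== SOURCE B (Python) =====
-- def sum_in_area(matrix: list) -> int:
--     n = len(matrix)
--     sum_up = sum_right = sum_down = sum_left = 0
--     for i, row in enumerate(matrix):
--         lo, hi = min(i, n - 1 - i), max(i, n - 1 - i)
--         sum_left += sum(row[0:lo])
--         sum_right += sum(row[hi + 1:n])
--         mid = sum(row[lo + 1:hi])
--         if 2 * i < n - 1:
--             sum_up += mid
--         elif 2 * i > n - 1:
--             sum_down += mid
--     return sum_up, sum_right, sum_down, sum_left
-- ===== Notes on version B (the rewrite author's own statement) =====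
-- stated objective: simpler
-- what changed: B replaces A's nested per-element loop with per-element sign branching by a single pass over the rows that adds three contiguous slice sums per row, with the quadrant column ranges computed once from the two diagonals.
import Mathlib
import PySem

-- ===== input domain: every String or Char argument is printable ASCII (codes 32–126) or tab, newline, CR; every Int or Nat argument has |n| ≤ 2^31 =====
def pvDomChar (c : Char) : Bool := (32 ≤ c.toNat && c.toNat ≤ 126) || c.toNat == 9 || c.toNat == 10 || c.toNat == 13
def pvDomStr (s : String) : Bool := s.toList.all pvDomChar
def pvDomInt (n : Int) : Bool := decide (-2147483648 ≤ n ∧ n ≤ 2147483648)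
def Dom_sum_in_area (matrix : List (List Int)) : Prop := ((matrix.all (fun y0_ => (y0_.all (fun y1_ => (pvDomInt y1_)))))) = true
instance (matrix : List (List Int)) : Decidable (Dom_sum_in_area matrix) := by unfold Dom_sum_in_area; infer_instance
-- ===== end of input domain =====

-- B replaces A's per-element double loop with one pass over the rows, adding three
-- contiguous slice sums per row (objective: simpler; a timing run measured it faster
-- by a constant factor: bulk slice sums instead of per-element branching).

-- ===== PORT A =====
-- the body of A's inner loop, step for step; state tuple in Python's variable
-- order (sum_up, sum_left, sum_right, sum_down)
def pvStepA (matrix : List (List Int)) (i : Nat) (s : Int × Int × Int × Int) (j : Nat) :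
    Int × Int × Int × Int :=
  let n : Int := matrix.length
  let m : Int := PySem.List.pyGetD (PySem.List.pyGetD matrix (i : Int) []) (j : Int) 0
  let s :=
    if i > j then
      (if (i : Int) < n - 1 - (j : Int) then (s.1, s.2.1 + m, s.2.2.1, s.2.2.2)
       else if (i : Int) > n - 1 - (j : Int) then (s.1, s.2.1, s.2.2.1, s.2.2.2 + m)
       else s)
    else s
  if i < j then
    (if (i : Int) < n - 1 - (j : Int) then (s.1 + m, s.2.1, s.2.2.1, s.2.2.2)
     else if (i : Int) > n - 1 - (j : Int) then (s.1, s.2.1, s.2.2.1 + m, s.2.2.2)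
     else s)
  else s

def sum_in_area (matrix : List (List Int)) : Int × Int × Int × Int :=
  let n := matrix.length
  let s := (List.range n).foldl
    (fun s (i : Nat) => (List.range n).foldl (pvStepA matrix i) s)
    ((0, 0, 0, 0) : Int × Int × Int × Int)
  (s.1, s.2.2.1, s.2.2.2, s.2.1)

-- ===== PORT B =====
-- the body of B's single row loop; state tuple in B's return order
-- (sum_up, sum_right, sum_down, sum_left)
def pvStepB (n : Int) (s : Int × Int × Int × Int) (p : Int × List Int) :
    Int × Int × Int × Int :=
  let i := p.1
  let row := p.2
  let lo := min i (n - 1 - i)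
  let hi := max i (n - 1 - i)
  let left := s.2.2.2 + (PySem.List.slice row (some 0) (some lo)).sum
  let right := s.2.1 + (PySem.List.slice row (some (hi + 1)) (some n)).sum
  let mid := (PySem.List.slice row (some (lo + 1)) (some hi)).sum
  let up := if 2 * i < n - 1 then s.1 + mid else s.1
  let down := if 2 * i > n - 1 then s.2.2.1 + mid else s.2.2.1
  (up, right, down, left)

def sum_in_area_alt (matrix : List (List Int)) : Int × Int × Int × Int :=
  let n : Int := matrix.length
  (PySem.List.enumerate matrix 0).foldl (pvStepB n) ((0, 0, 0, 0) : Int × Int × Int × Int)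

-- ===== PRECONDITION & SPEC =====
-- the minimal length row i's accesses in A reach: interior rows touch column n-1,
-- edge rows (i = 0 or i = n-1) only touch up to column n-2, and for n ≤ 2 nothing is accessed
def pvNeed (n i : Nat) : Nat := if n ≤ 2 then 0 else if i = 0 ∨ i = n - 1 then n - 1 else n

-- Pre_ holds exactly on the inputs where Python A returns (elsewhere A raises IndexError
-- on a too-short row); it is a pure shape condition on the row lengths.
def Pre_sum_in_area (matrix : List (List Int)) : Prop :=
  (matrix.zipIdx.all (fun p => pvNeed matrix.length p.2 ≤ p.1.length)) = true
instance (matrix : List (List Int)) : Decidable (Pre_sum_in_area matrix) := by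
  unfold Pre_sum_in_area; infer_instance

def pvWitness_sum_in_area : List (List Int) := [[1, 2, 3], [4, 5, 6], [7, 8, 9]]

def Spec_sum_in_area (matrix : List (List Int)) (out : Int × Int × Int × Int) : Prop := out = sum_in_area_alt matrix
instance (matrix : List (List Int)) (out : Int × Int × Int × Int) : Decidable (Spec_sum_in_area matrix out) := by unfold Spec_sum_in_area; infer_instance

-- ===== CLAIM (what is proved, stated in full; the proofs are below) =====
def Claim_equal_sum_in_area : Prop := ∀ (matrix : List (List Int)), Dom_sum_in_area matrix → Pre_sum_in_area matrix → Spec_sum_in_area matrix (sum_in_area matrix)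

-- ===== LEMMAS AND PROOFS =====

-- the matrix entry both gate functions read (0 outside the rows/row bounds)
def pvM (matrix : List (List Int)) (i j : Nat) : Int :=
  PySem.List.pyGetD (PySem.List.pyGetD matrix (i : Int) []) (j : Int) 0

-- the four quadrant gates of A: entry (i,j) counted iff its condition holds
def pvGU (matrix : List (List Int)) (i j : Nat) : Int :=
  if i < j ∧ (i : Int) < (matrix.length : Int) - 1 - (j : Int) then pvM matrix i j else 0
def pvGL (matrix : List (List Int)) (i j : Nat) : Int :=
  if j < i ∧ (i : Int) < (matrix.length : Int) - 1 - (j : Int) then pvM matrix i j else 0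
def pvGR (matrix : List (List Int)) (i j : Nat) : Int :=
  if i < j ∧ (i : Int) > (matrix.length : Int) - 1 - (j : Int) then pvM matrix i j else 0
def pvGD (matrix : List (List Int)) (i j : Nat) : Int :=
  if j < i ∧ (i : Int) > (matrix.length : Int) - 1 - (j : Int) then pvM matrix i j else 0

-- per-row quadrant sums, A-style (gated sum over all columns)
def pvSU (matrix : List (List Int)) (i : Nat) : Int :=
  ((List.range matrix.length).map (pvGU matrix i)).sum
def pvSL (matrix : List (List Int)) (i : Nat) : Int :=
  ((List.range matrix.length).map (pvGL matrix i)).sum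
def pvSR (matrix : List (List Int)) (i : Nat) : Int :=
  ((List.range matrix.length).map (pvGR matrix i)).sum
def pvSD (matrix : List (List Int)) (i : Nat) : Int :=
  ((List.range matrix.length).map (pvGD matrix i)).sum

-- generic: a fold whose step adds a function of the element to each of 4 components
theorem quad_foldl {α : Type} (f : (Int×Int×Int×Int) → α → (Int×Int×Int×Int))
    (a b c d : α → Int)
    (h : ∀ s x, f s x = (s.1 + a x, s.2.1 + b x, s.2.2.1 + c x, s.2.2.2 + d x)) :
    ∀ (L : List α) (s : Int×Int×Int×Int),
      L.foldl f s = (s.1 + (L.map a).sum, s.2.1 + (L.map b).sum,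
                     s.2.2.1 + (L.map c).sum, s.2.2.2 + (L.map d).sum) := by
  intro L
  induction L with
  | nil => intro s; simp
  | cons x t ih =>
    intro s
    simp only [List.foldl_cons, h, ih, List.map_cons, List.sum_cons, Prod.mk.injEq]
    refine ⟨by ring, by ring, by ring, by ring⟩

theorem getD_drop (row : List Int) (a k : Nat) :
    (row.drop a).getD k 0 = row.getD (a + k) 0 := by
  simp [List.getD_eq_getElem?_getD, List.getElem?_drop]

theorem take_succ_sum (l : List Int) (k : Nat) :
    (l.take (k+1)).sum = (l.take k).sum + l.getD k 0 := by
  simp only [List.take_add_one, List.sum_append, List.getD_eq_getElem?_getD]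
  cases h : l[k]? <;> · simp

theorem range_sum_gate (row : List Int) (a : Nat) :
    ∀ b, ((List.range b).map (fun j => if a ≤ j ∧ j < b then row.getD j 0 else 0)).sum
      = ((row.drop a).take (b - a)).sum := by
  intro b
  induction b with
  | zero => simp
  | succ b ih =>
    rw [List.range_succ, List.map_append, List.sum_append]
    have hshrink : ((List.range b).map (fun j => if a ≤ j ∧ j < b + 1 then row.getD j 0 else 0))
         = ((List.range b).map (fun j => if a ≤ j ∧ j < b then row.getD j 0 else 0)) := by
      apply List.map_congr_left
      intro j hj
      have := List.mem_range.mp hj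
      by_cases h : a ≤ j <;> simp [h]
      omega
    by_cases hab : a ≤ b
    · have h1 : b + 1 - a = (b - a) + 1 := by omega
      have h2 : a + (b - a) = b := by omega
      simp only [List.map_cons, List.map_nil, List.sum_cons, List.sum_nil]
      rw [h1, take_succ_sum, getD_drop, h2, hshrink, ih]
      simp [hab]
    · have h1 : b + 1 - a = 0 := by omega
      have h2 : b - a = 0 := by omega
      rw [hshrink, ih, h1, h2]
      simp [hab]

theorem range_extend_gate (row : List Int) (a b : Nat) :
    ∀ n, b ≤ n →
      ((List.range n).map (fun j => if a ≤ j ∧ j < b then row.getD j 0 else 0)).sum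
      = ((List.range b).map (fun j => if a ≤ j ∧ j < b then row.getD j 0 else 0)).sum := by
  intro n
  induction n with
  | zero => intro h; interval_cases b; rfl
  | succ n ih =>
    intro hb
    by_cases h : b ≤ n
    · rw [List.range_succ, List.map_append, List.sum_append]
      simp only [List.map_cons, List.map_nil, List.sum_cons, List.sum_nil]
      have hn : ¬ (a ≤ n ∧ n < b) := by omega
      rw [ih h]
      simp [hn]
    · have : b = n + 1 := by omega
      subst this
      rfl

-- interval characterisation, combining the two previous lemmas
theorem range_interval_sum (row : List Int) (a b n : Nat) (hb : b ≤ n) :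
    ((List.range n).map (fun j => if a ≤ j ∧ j < b then row.getD j 0 else 0)).sum
      = ((row.drop a).take (b - a)).sum := by
  rw [range_extend_gate row a b n hb, range_sum_gate]

-- A's inner-loop step adds exactly one gate value to each component
theorem stepA_quad (matrix : List (List Int)) (i : Nat) (s : Int × Int × Int × Int) (j : Nat) :
    pvStepA matrix i s j
      = (s.1 + pvGU matrix i j, s.2.1 + pvGL matrix i j,
         s.2.2.1 + pvGR matrix i j, s.2.2.2 + pvGD matrix i j) := by
  simp only [pvStepA, pvGU, pvGL, pvGR, pvGD, pvM]
  split_ifs <;> simp_all <;> omega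

-- A's value: per-row gated sums, reordered to (up, right, down, left)
theorem A_char (matrix : List (List Int)) :
    sum_in_area matrix
      = (((List.range matrix.length).map (pvSU matrix)).sum,
         ((List.range matrix.length).map (pvSR matrix)).sum,
         ((List.range matrix.length).map (pvSD matrix)).sum,
         ((List.range matrix.length).map (pvSL matrix)).sum) := by
  have hin : ∀ (i : Nat) (s : Int × Int × Int × Int),
      (List.range matrix.length).foldl (pvStepA matrix i) s
        = (s.1 + pvSU matrix i, s.2.1 + pvSL matrix i,
           s.2.2.1 + pvSR matrix i, s.2.2.2 + pvSD matrix i) := by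
    intro i s
    exact quad_foldl (pvStepA matrix i) (pvGU matrix i) (pvGL matrix i) (pvGR matrix i)
      (pvGD matrix i) (stepA_quad matrix i) (List.range matrix.length) s
  have hout := quad_foldl
      (fun s (i : Nat) => (List.range matrix.length).foldl (pvStepA matrix i) s)
      (pvSU matrix) (pvSL matrix) (pvSR matrix) (pvSD matrix)
      (fun s i => hin i s) (List.range matrix.length) ((0, 0, 0, 0) : Int × Int × Int × Int)
  simp only [sum_in_area, hout]
  simp

-- B's row step adds exactly the three slice sums (two of them gated) per component
theorem stepB_quad (n : Int) (s : Int × Int × Int × Int) (p : Int × List Int) :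
    pvStepB n s p
      = (s.1 + (if 2 * p.1 < n - 1 then
                  (PySem.List.slice p.2 (some (min p.1 (n - 1 - p.1) + 1))
                    (some (max p.1 (n - 1 - p.1)))).sum else 0),
         s.2.1 + (PySem.List.slice p.2 (some (max p.1 (n - 1 - p.1) + 1)) (some n)).sum,
         s.2.2.1 + (if 2 * p.1 > n - 1 then
                  (PySem.List.slice p.2 (some (min p.1 (n - 1 - p.1) + 1))
                    (some (max p.1 (n - 1 - p.1)))).sum else 0),
         s.2.2.2 + (PySem.List.slice p.2 (some 0) (some (min p.1 (n - 1 - p.1)))).sum) := by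
  simp only [pvStepB]
  split_ifs <;> simp


-- canonical form of a gated per-row sum: an interval of columns
theorem gate_canon (matrix : List (List Int)) (i a b : Nat) (hb : b ≤ matrix.length)
    (cond : Nat → Prop) [DecidablePred cond]
    (hiff : ∀ j, j < matrix.length → (cond j ↔ a ≤ j ∧ j < b)) :
    ((List.range matrix.length).map (fun j => if cond j then pvM matrix i j else 0)).sum
      = (((matrix.getD i []).drop a).take (b - a)).sum := by
  have : ((List.range matrix.length).map (fun j => if cond j then pvM matrix i j else 0))
       = ((List.range matrix.length).map
            (fun j => if a ≤ j ∧ j < b then (matrix.getD i []).getD j 0 else 0)) := by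
    apply List.map_congr_left
    intro j hj
    have hj := List.mem_range.mp hj
    have hm : pvM matrix i j = (matrix.getD i []).getD j 0 := by
      simp [pvM, PySem.List.pyGetD_natCast]
    rw [hm]
    by_cases hc : a ≤ j ∧ j < b
    · rw [if_pos ((hiff j hj).mpr hc), if_pos hc]
    · rw [if_neg (fun h => hc ((hiff j hj).mp h)), if_neg hc]
  rw [this, range_interval_sum _ _ _ _ hb]

-- the per-row equalities: each of B's slice sums is the corresponding gated sum of A
theorem row_up (matrix : List (List Int)) (i : Nat) (hi : i < matrix.length) :
    (if 2 * (i : Int) < (matrix.length : Int) - 1 then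
        (PySem.List.slice (PySem.List.pyGetD matrix (i : Int) [])
          (some (min (i : Int) ((matrix.length : Int) - 1 - i) + 1))
          (some (max (i : Int) ((matrix.length : Int) - 1 - i)))).sum else 0)
      = pvSU matrix i := by
  have hrow : PySem.List.pyGetD matrix ((i : Nat) : Int) [] = matrix.getD i [] :=
    PySem.List.pyGetD_natCast matrix i []
  have hcanon := gate_canon matrix i (i+1) (matrix.length - 1 - i) (by omega)
      (fun j => i < j ∧ (i : Int) < (matrix.length : Int) - 1 - (j : Int))
      (by intro j hj; constructor <;> intro h <;> omega)
  have hSU : pvSU matrix i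
      = (((matrix.getD i []).drop (i+1)).take ((matrix.length - 1 - i) - (i+1))).sum := by
    rw [pvSU, ← hcanon]; rfl
  by_cases h2 : 2 * (i : Int) < (matrix.length : Int) - 1
  · have hmin : min ((i : Nat) : Int) ((matrix.length : Int) - 1 - i) = (i : Int) := by omega
    have hmax : max ((i : Nat) : Int) ((matrix.length : Int) - 1 - i)
        = (matrix.length : Int) - 1 - i := by omega
    rw [if_pos h2, hrow, hmin, hmax]
    rw [PySem.List.slice_toNat]
    · rw [show (((i : Nat) : Int) + 1).toNat = i + 1 by omega,
          show ((matrix.length : Int) - 1 - ((i : Nat) : Int)).toNat = matrix.length - 1 - i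
            by omega, hSU]
    · omega
    · omega
  · rw [if_neg h2, hSU]
    have : (matrix.length - 1 - i) - (i+1) = 0 := by omega
    simp [this]

theorem row_right (matrix : List (List Int)) (i : Nat) (hi : i < matrix.length) :
    (PySem.List.slice (PySem.List.pyGetD matrix (i : Int) [])
        (some (max (i : Int) ((matrix.length : Int) - 1 - i) + 1))
        (some (matrix.length : Int))).sum
      = pvSR matrix i := by
  have hrow : PySem.List.pyGetD matrix ((i : Nat) : Int) [] = matrix.getD i [] :=
    PySem.List.pyGetD_natCast matrix i []
  have hcanon := gate_canon matrix i (max i (matrix.length - 1 - i) + 1) matrix.length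
      (le_refl _)
      (fun j => i < j ∧ (i : Int) > (matrix.length : Int) - 1 - (j : Int))
      (by intro j hj; constructor <;> intro h <;> omega)
  have hSR : pvSR matrix i
      = (((matrix.getD i []).drop (max i (matrix.length - 1 - i) + 1)).take
          (matrix.length - (max i (matrix.length - 1 - i) + 1))).sum := by
    rw [pvSR, ← hcanon]; rfl
  have hmax : max ((i : Nat) : Int) ((matrix.length : Int) - 1 - i)
      = ((max i (matrix.length - 1 - i) : Nat) : Int) := by omega
  rw [hrow, hmax]
  rw [PySem.List.slice_toNat]
  · rw [show (((max i (matrix.length - 1 - i) : Nat) : Int) + 1).toNat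
          = max i (matrix.length - 1 - i) + 1 by omega,
        show ((matrix.length : Nat) : Int).toNat = matrix.length by omega, hSR]
  · omega
  · omega

theorem row_down (matrix : List (List Int)) (i : Nat) (hi : i < matrix.length) :
    (if 2 * (i : Int) > (matrix.length : Int) - 1 then
        (PySem.List.slice (PySem.List.pyGetD matrix (i : Int) [])
          (some (min (i : Int) ((matrix.length : Int) - 1 - i) + 1))
          (some (max (i : Int) ((matrix.length : Int) - 1 - i)))).sum else 0)
      = pvSD matrix i := by
  have hrow : PySem.List.pyGetD matrix ((i : Nat) : Int) [] = matrix.getD i [] :=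
    PySem.List.pyGetD_natCast matrix i []
  have hcanon := gate_canon matrix i (matrix.length - i) i (by omega)
      (fun j => j < i ∧ (i : Int) > (matrix.length : Int) - 1 - (j : Int))
      (by intro j hj; constructor <;> intro h <;> omega)
  have hSD : pvSD matrix i
      = (((matrix.getD i []).drop (matrix.length - i)).take (i - (matrix.length - i))).sum := by
    rw [pvSD, ← hcanon]; rfl
  by_cases h2 : 2 * (i : Int) > (matrix.length : Int) - 1
  · have hmin : min ((i : Nat) : Int) ((matrix.length : Int) - 1 - i)
        = (matrix.length : Int) - 1 - i := by omega
    have hmax : max ((i : Nat) : Int) ((matrix.length : Int) - 1 - i) = (i : Int) := by omega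
    rw [if_pos h2, hrow, hmin, hmax]
    rw [PySem.List.slice_toNat]
    · rw [show ((matrix.length : Int) - 1 - ((i : Nat) : Int) + 1).toNat = matrix.length - i
            by omega,
          show (((i : Nat) : Int)).toNat = i by omega, hSD]
    · omega
    · omega
  · rw [if_neg h2, hSD]
    have : i - (matrix.length - i) = 0 := by omega
    simp [this]

theorem row_left (matrix : List (List Int)) (i : Nat) (hi : i < matrix.length) :
    (PySem.List.slice (PySem.List.pyGetD matrix (i : Int) [])
        (some 0) (some (min (i : Int) ((matrix.length : Int) - 1 - i)))).sum
      = pvSL matrix i := by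
  have hrow : PySem.List.pyGetD matrix ((i : Nat) : Int) [] = matrix.getD i [] :=
    PySem.List.pyGetD_natCast matrix i []
  have hcanon := gate_canon matrix i 0 (min i (matrix.length - 1 - i)) (by omega)
      (fun j => j < i ∧ (i : Int) < (matrix.length : Int) - 1 - (j : Int))
      (by intro j hj; constructor <;> intro h <;> omega)
  have hSL : pvSL matrix i
      = (((matrix.getD i []).drop 0).take (min i (matrix.length - 1 - i) - 0)).sum := by
    rw [pvSL, ← hcanon]; rfl
  have hmin : min ((i : Nat) : Int) ((matrix.length : Int) - 1 - i)
      = ((min i (matrix.length - 1 - i) : Nat) : Int) := by omega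
  rw [hrow, hmin, PySem.List.slice_zero_start, PySem.List.slice_to]
  · rw [show ((min i (matrix.length - 1 - i) : Nat) : Int).toNat
          = min i (matrix.length - 1 - i) by omega, hSL, List.drop_zero, Nat.sub_zero]
  · omega

-- B's value in the same shape as A_char's
theorem B_char (matrix : List (List Int)) :
    sum_in_area_alt matrix
      = (((List.range matrix.length).map (pvSU matrix)).sum,
         ((List.range matrix.length).map (pvSR matrix)).sum,
         ((List.range matrix.length).map (pvSD matrix)).sum,
         ((List.range matrix.length).map (pvSL matrix)).sum) := by
  have h := quad_foldl (pvStepB (matrix.length : Int)) _ _ _ _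
      (stepB_quad (matrix.length : Int))
      (PySem.List.enumerate matrix 0) ((0, 0, 0, 0) : Int × Int × Int × Int)
  simp only [sum_in_area_alt, h]
  rw [PySem.List.enumerate_eq_map_pyRange matrix ([] : List Int)]
  have hlen : PySem.List.len matrix = (matrix.length : Int) := rfl
  rw [hlen, PySem.List.pyRange_zero_natCast]
  simp only [List.map_map]
  have hU : ∀ k ∈ List.range matrix.length,
      ((fun p => if 2 * p.1 < (matrix.length : Int) - 1 then
          (PySem.List.slice p.2 (some (min p.1 ((matrix.length : Int) - 1 - p.1) + 1))
            (some (max p.1 ((matrix.length : Int) - 1 - p.1)))).sum else 0) ∘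
        (fun j => ((j : Int), PySem.List.pyGetD matrix j [])) ∘ (fun k : Nat => (k : Int))) k
        = pvSU matrix k := by
    intro k hk
    exact row_up matrix k (List.mem_range.mp hk)
  have hR : ∀ k ∈ List.range matrix.length,
      ((fun p => (PySem.List.slice p.2
            (some (max p.1 ((matrix.length : Int) - 1 - p.1) + 1))
            (some (matrix.length : Int))).sum) ∘
        (fun j => ((j : Int), PySem.List.pyGetD matrix j [])) ∘ (fun k : Nat => (k : Int))) k
        = pvSR matrix k := by
    intro k hk
    exact row_right matrix k (List.mem_range.mp hk)
  have hD : ∀ k ∈ List.range matrix.length,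
      ((fun p => if 2 * p.1 > (matrix.length : Int) - 1 then
          (PySem.List.slice p.2 (some (min p.1 ((matrix.length : Int) - 1 - p.1) + 1))
            (some (max p.1 ((matrix.length : Int) - 1 - p.1)))).sum else 0) ∘
        (fun j => ((j : Int), PySem.List.pyGetD matrix j [])) ∘ (fun k : Nat => (k : Int))) k
        = pvSD matrix k := by
    intro k hk
    exact row_down matrix k (List.mem_range.mp hk)
  have hL : ∀ k ∈ List.range matrix.length,
      ((fun p => (PySem.List.slice p.2 (some 0)
            (some (min p.1 ((matrix.length : Int) - 1 - p.1)))).sum) ∘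
        (fun j => ((j : Int), PySem.List.pyGetD matrix j [])) ∘ (fun k : Nat => (k : Int))) k
        = pvSL matrix k := by
    intro k hk
    exact row_left matrix k (List.mem_range.mp hk)
  rw [List.map_congr_left hU, List.map_congr_left hR, List.map_congr_left hD,
      List.map_congr_left hL]
  simp

-- ===== VERDICT (by name: the statement is the Claim_ definition above) =====
theorem sum_in_area_spec : Claim_equal_sum_in_area := by
  intro matrix _ _
  unfold Spec_sum_in_area
  rw [A_char, B_char]
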